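-- pv_equiv track=rewrite | github.com/koguz/Tartarus | analyze_behaviors.py | find_behavior_transitions
-- ===== SOURCE A (Python) =====
-- from collections import defaultdict, Counter
--
-- def find_pattern_in_sequence(pattern, sequence):
--     """Find all occurrences of pattern in sequence."""
--     positions = []
--     pattern_len = len(pattern)
--     for i in range(len(sequence) - pattern_len + 1):
--         if tuple(sequence[i:i+pattern_len]) == pattern:
--             positions.append(i)
--     return positions
--
-- def find_behavior_transitions(sequences, behaviors, state_stats):
--     """Find which behaviors tend to follow which."""
--     transitions = Counter()
--
--     for seq in sequences:
--         # Find all behavior occurrences in this sequence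
--         occurrences = []  # (start_pos, end_pos, behavior)
--         for behavior in behaviors:
--             positions = find_pattern_in_sequence(behavior, seq)
--             for pos in positions:
--                 occurrences.append((pos, pos + len(behavior), behavior))
--
--         # Sort by start position
--         occurrences.sort(key=lambda x: x[0])
--
--         # Find non-overlapping consecutive behaviors
--         i = 0
--         while i < len(occurrences) - 1:
--             curr_end = occurrences[i][1]
--             # Find next non-overlapping behavior
--             for j in range(i + 1, len(occurrences)):
--                 if occurrences[j][0] >= curr_end:
--                     # Found a transition
--                     b1 = occurrences[i][2]
--                     b2 = occurrences[j][2]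
--                     transitions[(b1, b2)] += 1
--                     break
--             i += 1
--
--     return transitions
-- ===== SOURCE B (Python) =====
-- from collections import Counter
-- from bisect import bisect_left
--
-- def find_behavior_transitions(sequences, behaviors, state_stats):
--     """Find which behaviors tend to follow which."""
--     transitions = Counter()
--     for seq in sequences:
--         n = len(seq)
--         # all behavior occurrences, sorted by start position
--         occurrences = sorted(
--             ((i, i + len(b), b)
--              for b in behaviors
--              for i in range(n - len(b) + 1)
--              if tuple(seq[i:i + len(b)]) == b),
--             key=lambda occ: occ[0])
--         starts = [occ[0] for occ in occurrences]
--         # binary search for the first non-overlapping later occurrence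
--         for i, (_, curr_end, b1) in enumerate(occurrences[:-1]):
--             j = bisect_left(starts, curr_end, i + 1)
--             if j < len(occurrences):
--                 transitions[(b1, occurrences[j][2])] += 1
--     return transitions
-- ===== Notes on version B (the rewrite author's own statement) =====
-- stated objective: faster
-- what changed: B builds each sequence's occurrence list with a single comprehension and replaces A's linear forward scan for the first non-overlapping later occurrence by bisect_left on the sorted start positions, making the transition phase O(m log m) instead of O(m^2) in the number of occurrences m (measured ~1.9-2.8x on the generated inputs).
import Mathlib
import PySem

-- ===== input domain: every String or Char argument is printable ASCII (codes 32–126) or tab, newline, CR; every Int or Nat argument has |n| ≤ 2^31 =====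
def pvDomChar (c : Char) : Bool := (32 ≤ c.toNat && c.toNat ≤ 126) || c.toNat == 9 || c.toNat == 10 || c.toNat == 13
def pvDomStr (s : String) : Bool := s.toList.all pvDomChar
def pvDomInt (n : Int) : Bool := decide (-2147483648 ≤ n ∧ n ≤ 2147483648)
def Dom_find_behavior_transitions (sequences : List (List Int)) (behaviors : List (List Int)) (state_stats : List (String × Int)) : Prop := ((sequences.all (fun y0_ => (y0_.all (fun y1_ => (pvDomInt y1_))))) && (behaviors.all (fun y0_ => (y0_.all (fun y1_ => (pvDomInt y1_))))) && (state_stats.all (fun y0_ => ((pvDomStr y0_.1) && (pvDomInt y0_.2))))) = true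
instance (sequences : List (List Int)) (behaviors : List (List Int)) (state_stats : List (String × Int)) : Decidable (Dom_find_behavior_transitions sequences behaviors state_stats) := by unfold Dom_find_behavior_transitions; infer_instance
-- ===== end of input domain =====

-- B builds each sequence's occurrence list with one comprehension and replaces A's
-- linear forward scan for the next non-overlapping occurrence by a binary search
-- (bisect_left) on the sorted start positions.


-- ===== PORT A =====
-- behaviors arrive as tuples of ints; `tuple(sequence[i:i+k]) == pattern` is
-- element-wise comparison, i.e. list equality here.
def find_pattern_in_sequence (pattern : List Int) (sequence : List Int) : List Int :=
  (PySem.List.pyRange 0 ((sequence.length : Int) - (pattern.length : Int) + 1) 1).foldl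
    (fun positions i =>
      if PySem.List.slice sequence (some i) (some (i + (pattern.length : Int))) == pattern
      then positions ++ [i] else positions) []

-- A's `occurrences` accumulation loop (per sequence)
def pvCollectOccurrences (behaviors : List (List Int)) (seq : List Int) :
    List (Int × Int × List Int) :=
  behaviors.foldl (fun occurrences behavior =>
    (find_pattern_in_sequence behavior seq).foldl
      (fun occurrences pos =>
        occurrences ++ [(pos, pos + (behavior.length : Int), behavior)]) occurrences) []

-- A's inner `for j in range(i+1, len(occurrences))` scan: first occurrence with start ≥ curr_end
def pvFindNext (occ : List (Int × Int × List Int)) (j : Nat) (curr_end : Int) :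
    Option (Int × Int × List Int) :=
  if h : j < occ.length then
    if occ[j].1 ≥ curr_end then some occ[j] else pvFindNext occ (j + 1) curr_end
  else none
termination_by occ.length - j

-- A's `while i < len(occurrences) - 1` loop
def pvTransLoop (occ : List (Int × Int × List Int)) (i : Nat)
    (transitions : PySem.Dict (List (List Int)) Int) : PySem.Dict (List (List Int)) Int :=
  if h : i + 1 < occ.length then
    let curr_end := occ[i].2.1
    let transitions' :=
      match pvFindNext occ (i + 1) curr_end with
      | some o =>
          -- transitions[(b1, b2)] += 1  (Counter: a missing key counts as 0)
          transitions.insert [occ[i].2.2, o.2.2] (transitions.getD [occ[i].2.2, o.2.2] 0 + 1)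
      | none => transitions
    pvTransLoop occ (i + 1) transitions'
  else transitions
termination_by occ.length - i

def find_behavior_transitions (sequences : List (List Int)) (behaviors : List (List Int)) (state_stats : List (String × Int)) : List (List (List Int) × Int) :=
  (sequences.foldl (fun transitions seq =>
      let occurrences :=
        PySem.List.sorted (pvCollectOccurrences behaviors seq) (fun x => x.1) false
      pvTransLoop occurrences 0 transitions)
    PySem.Dict.empty).items

-- ===== PORT B =====
-- B's occurrence comprehension, sorted by start position
def pvAltOccurrences (behaviors : List (List Int)) (seq : List Int) :
    List (Int × Int × List Int) :=
  PySem.List.sorted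
    (behaviors.flatMap (fun b =>
      ((PySem.List.pyRange 0 ((seq.length : Int) - (b.length : Int) + 1) 1).filter
          (fun i => PySem.List.slice seq (some i) (some (i + (b.length : Int))) == b)).map
        (fun i => (i, i + (b.length : Int), b))))
    (fun occ => occ.1) false

def find_behavior_transitions_alt (sequences : List (List Int)) (behaviors : List (List Int)) (state_stats : List (String × Int)) : List (List (List Int) × Int) :=
  (sequences.foldl (fun transitions seq =>
      let occurrences := pvAltOccurrences behaviors seq
      let starts := occurrences.map (fun occ => occ.1)
      -- for i, (_, curr_end, b1) in enumerate(occurrences[:-1])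
      (PySem.List.enumerate (PySem.List.slice occurrences none (some (-1))) 0).foldl
        (fun transitions ie =>
          -- bisect_left(starts, curr_end, i+1) = (i+1) + bisect_left(starts[i+1:], curr_end);
          -- the enumerate index ie.1 is nonnegative, so .toNat is exact here
          let j := ie.1.toNat + 1 +
            PySem.List.bisectLeft (starts.drop (ie.1.toNat + 1)) ie.2.2.1
          if h : j < occurrences.length then
            transitions.insert [ie.2.2.2, occurrences[j].2.2]
              (transitions.getD [ie.2.2.2, occurrences[j].2.2] 0 + 1)
          else transitions)
        transitions)
    PySem.Dict.empty).items

-- ===== PRECONDITION & SPEC =====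
def Spec_find_behavior_transitions (sequences : List (List Int)) (behaviors : List (List Int)) (state_stats : List (String × Int)) (out : List (List (List Int) × Int)) : Prop := out = find_behavior_transitions_alt sequences behaviors state_stats
instance (sequences : List (List Int)) (behaviors : List (List Int)) (state_stats : List (String × Int)) (out : List (List (List Int) × Int)) : Decidable (Spec_find_behavior_transitions sequences behaviors state_stats out) := by unfold Spec_find_behavior_transitions; infer_instance

-- ===== CLAIM (what is proved, stated in full; the proofs are below) =====
def Claim_equal_find_behavior_transitions : Prop := ∀ (sequences : List (List Int)) (behaviors : List (List Int)) (state_stats : List (String × Int)), Dom_find_behavior_transitions sequences behaviors state_stats → Spec_find_behavior_transitions sequences behaviors state_stats (find_behavior_transitions sequences behaviors state_stats)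

-- ===== LEMMAS AND PROOFS =====

-- A's pattern scan is the filtered range
theorem pv_fp_eq (pattern seq : List Int) :
    find_pattern_in_sequence pattern seq =
      (PySem.List.pyRange 0 ((seq.length : Int) - (pattern.length : Int) + 1) 1).filter
        (fun i => PySem.List.slice seq (some i) (some (i + (pattern.length : Int))) == pattern) := by
  unfold find_pattern_in_sequence
  rw [PySem.List.foldl_append_if_eq_filter]
  simp

-- A's occurrence loop equals B's comprehension (before sorting)
theorem pv_collect_eq (behaviors : List (List Int)) (seq : List Int) :
    pvCollectOccurrences behaviors seq =
      behaviors.flatMap (fun b =>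
        ((PySem.List.pyRange 0 ((seq.length : Int) - (b.length : Int) + 1) 1).filter
            (fun i => PySem.List.slice seq (some i) (some (i + (b.length : Int))) == b)).map
          (fun i => (i, i + (b.length : Int), b))) := by
  unfold pvCollectOccurrences
  have h := PySem.List.foldl_congr_mem behaviors
    (fun occurrences behavior =>
      (find_pattern_in_sequence behavior seq).foldl
        (fun occurrences pos =>
          occurrences ++ [(pos, pos + (behavior.length : Int), behavior)]) occurrences)
    (fun occurrences b =>
      occurrences ++
        ((PySem.List.pyRange 0 ((seq.length : Int) - (b.length : Int) + 1) 1).filter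
            (fun i => PySem.List.slice seq (some i) (some (i + (b.length : Int))) == b)).map
          (fun i => (i, i + (b.length : Int), b)))
    []
    (by intro acc b _; simp only []; rw [PySem.List.foldl_append_singleton_eq_map, pv_fp_eq])
  rw [h, PySem.List.foldl_append_eq_flatMap]
  simp

-- A's forward scan is find? on the suffix
theorem pv_findNext_eq_find? (occ : List (Int × Int × List Int)) :
    ∀ (k : Nat) (x : Int),
      pvFindNext occ k x = (occ.drop k).find? (fun o => decide (x ≤ o.1)) := by
  have main : ∀ (n k : Nat), occ.length - k ≤ n → ∀ x,
      pvFindNext occ k x = (occ.drop k).find? (fun o => decide (x ≤ o.1)) := by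
    intro n
    induction n with
    | zero =>
      intro k hk x
      have hnk : ¬ k < occ.length := by omega
      rw [pvFindNext]
      simp [hnk, List.drop_eq_nil_of_le (by omega : occ.length ≤ k)]
    | succ n ih =>
      intro k hk x
      rw [pvFindNext]
      by_cases h : k < occ.length
      · simp only [dif_pos h]
        rw [List.drop_eq_getElem_cons h]
        by_cases hge : occ[k].1 ≥ x
        · rw [List.find?_cons_of_pos (by simpa using hge)]
          simp [hge]
        · rw [List.find?_cons_of_neg (by simpa using hge)]
          simp only [if_neg hge]
          exact ih (k + 1) (by omega) x
      · simp [h, List.drop_eq_nil_of_le (by omega : occ.length ≤ k)]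
  intro k x; exact main (occ.length - k) k le_rfl x

-- a membership scan whose hits form a suffix starting at b returns the element at b
theorem pv_find?_eq_getElem? {α : Type} (p : α → Bool) (l : List α) (b : Nat)
    (hble : b ≤ l.length)
    (hlt : ∀ j (hj : j < l.length), j < b → p l[j] = false)
    (hge : ∀ j (hj : j < l.length), b ≤ j → p l[j] = true) :
    l.find? p = l[b]? := by
  induction l generalizing b with
  | nil =>
    have : b = 0 := by simpa using hble
    simp [this]
  | cons a t ih =>
    cases b with
    | zero =>
      rw [List.find?_cons_of_pos (by simpa using hge 0 (by simp) (by omega))]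
      simp
    | succ b' =>
      rw [List.find?_cons_of_neg (by simpa using hlt 0 (by simp) (by omega))]
      have := ih b' (by simpa using hble)
        (fun j hj hj2 => by simpa using hlt (j + 1) (by simpa using Nat.succ_lt_succ hj) (by omega))
        (fun j hj hj2 => by simpa using hge (j + 1) (by simpa using Nat.succ_lt_succ hj) (by omega))
      simpa using this

-- drop of enumerate is enumerate of drop
theorem pv_enumerate_drop {α : Type} (xs : List α) :
    ∀ (k : Nat) (s : Int),
      (PySem.List.enumerate xs s).drop k = PySem.List.enumerate (xs.drop k) (s + k) := by
  induction xs with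
  | nil => intro k s; simp [PySem.List.enumerate]
  | cons x t ih =>
    intro k s
    cases k with
    | zero => simp
    | succ k' =>
      rw [PySem.List.enumerate_cons]
      simp only [List.drop_succ_cons]
      rw [ih k' (s + 1)]
      congr 1
      push_cast
      ring

-- on a start-sorted occurrence list, A's while/scan loop is B's enumerate/bisect fold
-- bisect on the sorted suffix finds exactly what A's scan finds
theorem pv_findNext_eq_bisect (occ : List (Int × Int × List Int))
    (hs : ((occ.map (fun o => o.1)) : List Int).Pairwise (· ≤ ·)) (m : Nat) (x : Int) :
    pvFindNext occ m x =
      occ[m + PySem.List.bisectLeft ((occ.map (fun o => o.1)).drop m) x]? := by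
  set t := occ.drop m with ht
  have hmap : (occ.map (fun o => o.1)).drop m = t.map (fun o => o.1) := by
    rw [ht, List.map_drop]
  set b := PySem.List.bisectLeft ((occ.map (fun o => o.1)).drop m) x with hb
  have hpw : (t.map (fun o => o.1)).Pairwise (· ≤ ·) := by
    rw [← hmap]; exact hs.drop
  obtain ⟨hle, hlt, hge⟩ := PySem.List.bisectLeft_spec (t.map (fun o => o.1)) x hpw
  rw [hmap] at hb
  rw [← hb] at hle hlt hge
  rw [pv_findNext_eq_find?, ← ht, ← List.getElem?_drop, ← ht]
  apply pv_find?_eq_getElem?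
  · simpa using hle
  · intro j hj hjb
    have := hlt j (by simpa using hj) (by omega)
    simp only [List.getElem_map] at this
    simp [not_le.mpr this]
  · intro j hj hjb
    have := hge j (by simpa using hj) (by omega)
    simp only [List.getElem_map] at this
    simp [this]

theorem pv_loop_eq (occ : List (Int × Int × List Int))
    (hs : ((occ.map (fun o => o.1)) : List Int).Pairwise (· ≤ ·)) :
    ∀ (k : Nat) (tr : PySem.Dict (List (List Int)) Int),
      pvTransLoop occ k tr =
        ((PySem.List.enumerate occ.dropLast 0).drop k).foldl
          (fun transitions ie =>
            let j := ie.1.toNat + 1 +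
              PySem.List.bisectLeft ((occ.map (fun o => o.1)).drop (ie.1.toNat + 1)) ie.2.2.1
            if h : j < occ.length then
              transitions.insert [ie.2.2.2, occ[j].2.2]
                (transitions.getD [ie.2.2.2, occ[j].2.2] 0 + 1)
            else transitions)
          tr := by
  have main : ∀ (n k : Nat) (tr : PySem.Dict (List (List Int)) Int), occ.length - k ≤ n →
      pvTransLoop occ k tr =
        ((PySem.List.enumerate occ.dropLast 0).drop k).foldl
          (fun transitions ie =>
            let j := ie.1.toNat + 1 +
              PySem.List.bisectLeft ((occ.map (fun o => o.1)).drop (ie.1.toNat + 1)) ie.2.2.1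
            if h : j < occ.length then
              transitions.insert [ie.2.2.2, occ[j].2.2]
                (transitions.getD [ie.2.2.2, occ[j].2.2] 0 + 1)
            else transitions)
          tr := by
    intro n
    induction n with
    | zero =>
      intro k tr hk
      have hnk : ¬ k + 1 < occ.length := by omega
      rw [pvTransLoop]
      rw [List.drop_eq_nil_of_le (by simp [PySem.List.length_enumerate]; omega)]
      simp [hnk]
    | succ n ih =>
      intro k tr hk
      by_cases h1 : k + 1 < occ.length
      · have hk' : k < occ.dropLast.length := by
          rw [List.length_dropLast]; omega
        rw [pvTransLoop]
        simp only [dif_pos h1]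
        rw [pv_enumerate_drop, List.drop_eq_getElem_cons hk', PySem.List.enumerate_cons,
          List.getElem_dropLast, List.foldl_cons]
        have harith : (0 : Int) + (k : Int) + 1 = 0 + ((k + 1 : Nat) : Int) := by push_cast; ring
        rw [harith, ← pv_enumerate_drop]
        rw [ih (k + 1) _ (by omega)]
        congr 1
        have htn : ((0 : Int) + (k : Int)).toNat = k := by omega
        simp only [htn]
        rw [pv_findNext_eq_bisect occ hs (k + 1) occ[k].2.1]
        by_cases h2 : k + 1 + PySem.List.bisectLeft ((occ.map (fun o => o.1)).drop (k + 1)) occ[k].2.1 < occ.length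
        · rw [List.getElem?_eq_getElem h2]
          simp [h2]
        · rw [List.getElem?_eq_none (by omega)]
          simp [h2]
      · rw [pvTransLoop]
        rw [List.drop_eq_nil_of_le (by simp [PySem.List.length_enumerate]; omega)]
        simp [h1]
  intro k tr; exact main (occ.length - k) k tr le_rfl

-- ===== VERDICT (by name: the statement is the Claim_ definition above) =====
theorem find_behavior_transitions_spec : Claim_equal_find_behavior_transitions := by
  intro sequences behaviors state_stats _
  show find_behavior_transitions sequences behaviors state_stats =
    find_behavior_transitions_alt sequences behaviors state_stats
  unfold find_behavior_transitions find_behavior_transitions_alt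
  congr 1
  apply PySem.List.foldl_congr_mem
  intro tr seq _
  have hocc : PySem.List.sorted (pvCollectOccurrences behaviors seq) (fun x => x.1) false
      = pvAltOccurrences behaviors seq := by
    unfold pvAltOccurrences; rw [pv_collect_eq]
  rw [hocc]
  rw [pv_loop_eq (pvAltOccurrences behaviors seq)
    (by
      unfold pvAltOccurrences
      exact List.pairwise_map.mpr (PySem.List.sorted_pairwise _ _)) 0 tr]
  simp [PySem.List.slice_to_neg_one]
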